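-- pv_equiv track=rewrite | github.com/lorenzobasile2000/PANPHORTE | CNV_simulator/CNV_reads_sim.py | recover_repetitive_elements
-- ===== SOURCE A (Python) =====
-- def recover_repetitive_elements(max_seq, operations):
--     """
--     Dato il haplotype massimo e la lista di operazioni, estrae per ogni operazione
--     l'elemento ripetitivo: si preleva dalla porzione inserita (di lunghezza y)
--     i primi x caratteri, che corrispondono alla unità di ripetizione.
--     """
--     rep_elements = []
--     offset = 0
--     for op in operations:
--         pos = op["R"] + offset
--         inserted_segment = max_seq[pos: pos + op["y"]]
--         rep_unit = inserted_segment[:op["x"]]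
--         rep_elements.append(rep_unit)
--         offset += op["y"]
--     return rep_elements
-- ===== SOURCE B (Python) =====
-- def recover_repetitive_elements(max_seq, operations):
--     # Traverse the operations RIGHT-TO-LEFT: start from the total inserted length
--     # and subtract each y to recover that op's offset, collecting results in
--     # reverse and flipping once at the end (back-to-front construction).
--     offset = sum(op["y"] for op in operations)
--     out_rev = []
--     for op in reversed(operations):
--         offset -= op["y"]
--         pos = op["R"] + offset
--         out_rev.append(max_seq[pos: pos + op["y"]][:op["x"]])
--     out_rev.reverse()
--     return out_rev
-- ===== Notes on version B (the rewrite author's own statement) =====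
-- stated objective: alternative
-- what changed: B traverses the operations right-to-left, recovering each offset by subtracting y from the total inserted length instead of accumulating it, and builds the output back-to-front with a final reverse.
import Mathlib
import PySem

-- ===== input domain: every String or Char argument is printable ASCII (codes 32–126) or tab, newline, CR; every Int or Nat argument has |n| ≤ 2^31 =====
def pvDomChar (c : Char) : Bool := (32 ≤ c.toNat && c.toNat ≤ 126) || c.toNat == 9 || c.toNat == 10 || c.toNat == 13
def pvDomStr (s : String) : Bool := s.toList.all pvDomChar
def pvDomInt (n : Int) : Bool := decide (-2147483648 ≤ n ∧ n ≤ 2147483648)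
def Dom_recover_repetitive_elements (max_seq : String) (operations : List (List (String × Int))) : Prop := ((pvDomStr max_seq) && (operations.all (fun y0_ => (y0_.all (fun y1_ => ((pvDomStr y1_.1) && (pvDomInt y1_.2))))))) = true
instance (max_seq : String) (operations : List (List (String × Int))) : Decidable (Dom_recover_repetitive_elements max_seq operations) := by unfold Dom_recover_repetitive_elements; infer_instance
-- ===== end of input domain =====

-- B replaces A's left-to-right running-offset loop by a right-to-left traversal that
-- recovers each offset by subtraction from the total inserted length and builds the
-- output back-to-front; same cost (objective: alternative).

-- ===== PORT A =====
-- A: one forward loop carrying (rep_elements, offset); op["k"] is first-match association-list lookup.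
def recover_repetitive_elements (max_seq : String) (operations : List (List (String × Int))) : List String :=
  (operations.foldl
    (fun (st : List String × Int) (op : List (String × Int)) =>
      let pos : Int := ((op.lookup "R").getD 0) + st.2
      let inserted_segment := PySem.Str.slice max_seq (some pos) (some (pos + (op.lookup "y").getD 0))
      let rep_unit := PySem.Str.slice inserted_segment none (some ((op.lookup "x").getD 0))
      (st.1 ++ [rep_unit], st.2 + (op.lookup "y").getD 0))
    ([], 0)).1

-- ===== PORT B =====
-- B: total = sum of the y's; loop over reversed(operations) with offset -= y, out_rev.append; reverse at the end.
def recover_repetitive_elements_alt (max_seq : String) (operations : List (List (String × Int))) : List String :=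
  let total : Int := operations.foldl (fun a op => a + (op.lookup "y").getD 0) 0
  let st := operations.reverse.foldl
    (fun (st : Int × List String) (op : List (String × Int)) =>
      let off := st.1 - (op.lookup "y").getD 0
      let pos : Int := ((op.lookup "R").getD 0) + off
      (off, st.2 ++ [PySem.Str.slice (PySem.Str.slice max_seq (some pos) (some (pos + (op.lookup "y").getD 0))) none (some ((op.lookup "x").getD 0))]))
    (total, ([] : List String))
  st.2.reverse

-- ===== PRECONDITION & SPEC =====
-- Pre_ excludes operations missing one of the keys "R", "x", "y", on which Python A raises KeyError.
def Pre_recover_repetitive_elements (max_seq : String) (operations : List (List (String × Int))) : Prop :=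
  ∀ op ∈ operations, (op.lookup "R").isSome ∧ (op.lookup "x").isSome ∧ (op.lookup "y").isSome

instance (max_seq : String) (operations : List (List (String × Int))) : Decidable (Pre_recover_repetitive_elements max_seq operations) := by unfold Pre_recover_repetitive_elements; infer_instance

def pvWitness_recover_repetitive_elements : String × (List (List (String × Int))) :=
  ("ABCABCXY", [[("R", 0), ("x", 3), ("y", 6)], [("R", 6), ("x", 1), ("y", 2)]])

def Spec_recover_repetitive_elements (max_seq : String) (operations : List (List (String × Int))) (out : List String) : Prop := out = recover_repetitive_elements_alt max_seq operations
instance (max_seq : String) (operations : List (List (String × Int))) (out : List String) : Decidable (Spec_recover_repetitive_elements max_seq operations out) := by unfold Spec_recover_repetitive_elements; infer_instance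

-- ===== CLAIM (what is proved, stated in full; the proofs are below) =====
def Claim_equal_recover_repetitive_elements : Prop := ∀ (max_seq : String) (operations : List (List (String × Int))), Dom_recover_repetitive_elements max_seq operations → Pre_recover_repetitive_elements max_seq operations → Spec_recover_repetitive_elements max_seq operations (recover_repetitive_elements max_seq operations)

-- ===== LEMMAS AND PROOFS =====

-- abbreviations used only by the proofs
def pvY (op : List (String × Int)) : Int := (op.lookup "y").getD 0

def pvRep (max_seq : String) (op : List (String × Int)) (off : Int) : String :=
  let pos : Int := ((op.lookup "R").getD 0) + off
  PySem.Str.slice (PySem.Str.slice max_seq (some pos) (some (pos + pvY op)))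
    none (some ((op.lookup "x").getD 0))

-- the common functional specification: forward recursion with explicit offset
def pvSpecF (max_seq : String) : List (List (String × Int)) → Int → List String
  | [], _ => []
  | op :: t, off => pvRep max_seq op off :: pvSpecF max_seq t (off + pvY op)

def pvSumY (l : List (List (String × Int))) : Int := (l.map pvY).sum

-- the reversed-traversal spec: offsets obtained by subtraction
def pvBspec (max_seq : String) : List (List (String × Int)) → Int → List String
  | [], _ => []
  | op :: t, s => pvRep max_seq op (s - pvY op) :: pvBspec max_seq t (s - pvY op)

lemma pvA_foldl (max_seq : String) :
    ∀ (ops : List (List (String × Int))) (acc : List String) (off : Int),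
      (ops.foldl
        (fun (st : List String × Int) (op : List (String × Int)) =>
          let pos : Int := ((op.lookup "R").getD 0) + st.2
          let inserted_segment := PySem.Str.slice max_seq (some pos) (some (pos + (op.lookup "y").getD 0))
          let rep_unit := PySem.Str.slice inserted_segment none (some ((op.lookup "x").getD 0))
          (st.1 ++ [rep_unit], st.2 + (op.lookup "y").getD 0))
        (acc, off)).1
      = acc ++ pvSpecF max_seq ops off := by
  intro ops
  induction ops with
  | nil => intro acc off; simp [pvSpecF]
  | cons op rest ih =>
    intro acc off
    simp only [List.foldl_cons]
    rw [ih]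
    simp [pvSpecF, pvRep, pvY]

lemma pvB_foldl (max_seq : String) :
    ∀ (ops : List (List (String × Int))) (acc : List String) (s : Int),
      (ops.foldl
        (fun (st : Int × List String) (op : List (String × Int)) =>
          let off := st.1 - (op.lookup "y").getD 0
          let pos : Int := ((op.lookup "R").getD 0) + off
          (off, st.2 ++ [PySem.Str.slice (PySem.Str.slice max_seq (some pos) (some (pos + (op.lookup "y").getD 0))) none (some ((op.lookup "x").getD 0))]))
        (s, acc)).2
      = acc ++ pvBspec max_seq ops s := by
  intro ops
  induction ops with
  | nil => intro acc s; simp [pvBspec]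
  | cons op rest ih =>
    intro acc s
    simp only [List.foldl_cons]
    rw [ih]
    simp [pvBspec, pvRep, pvY]

lemma pvBspec_append (max_seq : String) :
    ∀ (a b : List (List (String × Int))) (s : Int),
      pvBspec max_seq (a ++ b) s = pvBspec max_seq a s ++ pvBspec max_seq b (s - pvSumY a) := by
  intro a
  induction a with
  | nil => intro b s; simp [pvBspec, pvSumY]
  | cons op t ih =>
    intro b s
    simp only [List.cons_append, pvBspec, ih]
    have : s - pvSumY (op :: t) = s - pvY op - pvSumY t := by
      simp [pvSumY]; ring
    rw [this]

lemma pvB_eq_specF (max_seq : String) :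
    ∀ (ops : List (List (String × Int))) (off : Int),
      (pvBspec max_seq ops.reverse (off + pvSumY ops)).reverse = pvSpecF max_seq ops off := by
  intro ops
  induction ops with
  | nil => intro off; simp [pvBspec, pvSpecF]
  | cons op t ih =>
    intro off
    have hsum : pvSumY (op :: t) = pvY op + pvSumY t := by simp [pvSumY]
    have hrev : pvSumY t.reverse = pvSumY t := by simp [pvSumY]
    rw [List.reverse_cons, pvBspec_append, hsum, hrev]
    have h1 : off + (pvY op + pvSumY t) - pvSumY t = off + pvY op := by ring
    simp only [h1, pvBspec]
    have h2 : off + pvY op - pvY op = off := by ring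
    rw [h2]
    have h3 : off + (pvY op + pvSumY t) = off + pvY op + pvSumY t := by ring
    rw [h3]
    simp [pvSpecF, ih (off + pvY op)]

lemma pvTotal_eq (ops : List (List (String × Int))) :
    ∀ s : Int, ops.foldl (fun a op => a + (op.lookup "y").getD 0) s = s + pvSumY ops := by
  induction ops with
  | nil => intro s; simp [pvSumY]
  | cons op t ih =>
    intro s
    simp only [List.foldl_cons, ih, pvSumY, List.map_cons, List.sum_cons, pvY]
    ring

-- ===== VERDICT (by name: the statement is the Claim_ definition above) =====
theorem recover_repetitive_elements_spec : Claim_equal_recover_repetitive_elements := by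
  intro max_seq operations _ _
  unfold Spec_recover_repetitive_elements recover_repetitive_elements recover_repetitive_elements_alt
  simp only [pvA_foldl, pvB_foldl, pvTotal_eq, List.nil_append, zero_add]
  simpa using (pvB_eq_specF max_seq operations 0).symm
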